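-- pv_equiv track=rewrite | github.com/iagolarrondo/investigai-text-to-graph | src/app/investigation_graph.py | _pick_focus_node
-- ===== SOURCE A (Python) =====
-- def _pick_focus_node(anchors: set[str]) -> str | None:
--     if not anchors:
--         return None
--     for prefix in ("Claim|", "Person|", "Policy|"):
--         for a in sorted(anchors):
--             if a.startswith(prefix):
--                 return a
--     return sorted(anchors)[0]
-- ===== SOURCE B (Python) =====
-- def _pick_focus_node(anchors: set[str]) -> str | None:
--     if not anchors:
--         return None
--
--     def _priority(a):
--         if a.startswith("Claim|"):
--             tier = 0
--         elif a.startswith("Person|"):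
--             tier = 1
--         elif a.startswith("Policy|"):
--             tier = 2
--         else:
--             tier = 3
--         return (tier, a)
--
--     return min(anchors, key=_priority)
-- ===== Notes on version B (the rewrite author's own statement) =====
-- stated objective: faster
-- what changed: Replaces A's per-prefix repeated sorted() scans plus a final sorted()[0] fallback with a single min() pass under the key (tier, anchor), where tier is 0/1/2/3 for Claim|/Person|/Policy|/other anchors.
import Mathlib
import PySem

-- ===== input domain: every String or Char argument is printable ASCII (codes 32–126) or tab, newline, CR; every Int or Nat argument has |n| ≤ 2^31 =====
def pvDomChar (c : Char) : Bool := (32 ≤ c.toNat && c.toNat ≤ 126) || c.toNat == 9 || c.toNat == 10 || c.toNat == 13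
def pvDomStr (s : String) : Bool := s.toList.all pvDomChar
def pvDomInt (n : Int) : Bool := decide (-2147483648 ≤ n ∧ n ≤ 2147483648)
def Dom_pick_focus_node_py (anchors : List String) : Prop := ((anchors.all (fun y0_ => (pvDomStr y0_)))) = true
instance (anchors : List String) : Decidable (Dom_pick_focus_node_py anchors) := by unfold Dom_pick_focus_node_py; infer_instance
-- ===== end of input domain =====

-- B replaces A's per-prefix repeated sorted() scans with one min() pass under the key (tier, anchor); objective: simpler.

-- ===== PORT A =====
-- the outer 'for prefix in (...)' loop: each iteration scans sorted(anchors) for the first match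
def pvPickLoop (prefixes : List String) (anchors : List String) : Option String :=
  match prefixes with
  | [] => none
  | p :: ps =>
    match (PySem.List.sorted anchors (fun x => x)).find? (fun a => PySem.Str.startswith a p) with
    | some a => some a
    | none => pvPickLoop ps anchors

def pick_focus_node_py (anchors : List String) : Option String :=
  if anchors = [] then none
  else
    match pvPickLoop ["Claim|", "Person|", "Policy|"] anchors with
    | some a => some a
    | none => PySem.List.pyGet? (PySem.List.sorted anchors (fun x => x)) 0

-- ===== PORT B =====
-- the tier component of _priority (chained ifs, same order as in Source B)
def pvTier (a : String) : Nat :=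
  if PySem.Str.startswith a "Claim|" then 0
  else if PySem.Str.startswith a "Person|" then 1
  else if PySem.Str.startswith a "Policy|" then 2
  else 3

def pick_focus_node_py_alt (anchors : List String) : Option String :=
  if anchors = [] then none
  else PySem.List.min2? anchors pvTier (fun a => a)

-- ===== PRECONDITION & SPEC =====
def Spec_pick_focus_node_py (anchors : List String) (out : Option String) : Prop := out = pick_focus_node_py_alt anchors
instance (anchors : List String) (out : Option String) : Decidable (Spec_pick_focus_node_py anchors out) := by unfold Spec_pick_focus_node_py; infer_instance

-- ===== CLAIM (what is proved, stated in full; the proofs are below) =====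
def Claim_equal_pick_focus_node_py : Prop := ∀ (anchors : List String), Dom_pick_focus_node_py anchors → Spec_pick_focus_node_py anchors (pick_focus_node_py anchors)

-- ===== LEMMAS AND PROOFS =====

-- the lexicographic order on (pvTier a, a) that both programs minimise
def pvLe (a b : String) : Prop := pvTier a < pvTier b ∨ (pvTier a = pvTier b ∧ a ≤ b)

def pvIsMin (m : String) (xs : List String) : Prop := m ∈ xs ∧ ∀ y ∈ xs, pvLe m y

theorem pvLe_refl (a : String) : pvLe a a := Or.inr ⟨rfl, le_refl a⟩

theorem pvLe_trans {a b c : String} (h1 : pvLe a b) (h2 : pvLe b c) : pvLe a c := by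
  rcases h1 with h1 | ⟨h1, h1'⟩ <;> rcases h2 with h2 | ⟨h2, h2'⟩
  · exact Or.inl (h1.trans h2)
  · exact Or.inl (h2 ▸ h1)
  · exact Or.inl (h1 ▸ h2)
  · exact Or.inr ⟨h1.trans h2, h1'.trans h2'⟩

theorem pvLe_antisymm {a b : String} (h1 : pvLe a b) (h2 : pvLe b a) : a = b := by
  rcases h1 with h1 | ⟨h1, h1'⟩ <;> rcases h2 with h2 | ⟨h2, h2'⟩
  · omega
  · omega
  · omega
  · exact le_antisymm h1' h2'

theorem pvMin_unique {m m' : String} {xs : List String}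
    (h1 : pvIsMin m xs) (h2 : pvIsMin m' xs) : m = m' :=
  pvLe_antisymm (h1.2 m' h2.1) (h2.2 m h1.1)

-- tier facts read off the chained ifs
theorem pvTier_cases (a : String) :
    (pvTier a = 0 ↔ PySem.Str.startswith a "Claim|" = true) ∧
    (pvTier a = 1 ↔ (PySem.Str.startswith a "Claim|" = false ∧ PySem.Str.startswith a "Person|" = true)) ∧
    (pvTier a = 2 ↔ (PySem.Str.startswith a "Claim|" = false ∧ PySem.Str.startswith a "Person|" = false ∧ PySem.Str.startswith a "Policy|" = true)) := by
  unfold pvTier; split_ifs with h1 h2 h3 <;> simp_all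

-- the step function of PySem.List.min2? anchors pvTier id, named for the proofs
def pvStep (acc : Option String) (x : String) : Option String :=
  match acc with
  | none => some x
  | some m =>
    if (decide (pvTier x < pvTier m) || !decide (pvTier m < pvTier x) && decide ((fun a : String => a) x < (fun a : String => a) m)) = true
    then some x else some m

theorem pvMin2_eq_foldl (xs : List String) :
    PySem.List.min2? xs pvTier (fun a => a) = List.foldl pvStep none xs := by
  unfold PySem.List.min2?
  congr 1
  funext acc x
  cases acc <;> rfl

-- the foldl inside min2? returns the lexicographic minimum of the accumulator and the list
theorem pvMin2_go (xs : List String) :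
    ∀ (m : String), ∃ r,
      List.foldl pvStep (some m) xs = some r ∧ (r = m ∨ r ∈ xs) ∧ pvLe r m ∧ ∀ y ∈ xs, pvLe r y := by
  induction xs with
  | nil => intro m; exact ⟨m, rfl, Or.inl rfl, pvLe_refl m, by simp⟩
  | cons x t ih =>
    intro m
    by_cases hc : (decide (pvTier x < pvTier m) || !decide (pvTier m < pvTier x) && decide (x < m)) = true
    · -- x replaces the accumulator: x <lex m
      have hxm : pvLe x m := by
        simp only [Bool.or_eq_true, Bool.and_eq_true, Bool.not_eq_true', decide_eq_true_eq,
          decide_eq_false_iff_not] at hc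
        rcases hc with h | ⟨h, h'⟩
        · exact Or.inl h
        · rcases Nat.lt_or_ge (pvTier x) (pvTier m) with hlt | hge
          · exact Or.inl hlt
          · exact Or.inr ⟨le_antisymm (le_of_not_gt h) hge, le_of_lt h'⟩
      obtain ⟨r, hr, hmem, hrx, hmin⟩ := ih x
      refine ⟨r, ?_, ?_, pvLe_trans hrx hxm, ?_⟩
      · rw [List.foldl_cons]; show List.foldl pvStep (if _ then some x else some m) t = some r
        rw [if_pos hc]; exact hr
      · rcases hmem with h | h
        · exact Or.inr (h ▸ List.mem_cons_self)
        · exact Or.inr (List.mem_cons_of_mem _ h)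
      · intro y hy
        rcases List.mem_cons.mp hy with h | h
        · exact h ▸ hrx
        · exact hmin y h
    · -- the accumulator m stays: m ≤lex x
      have hmx : pvLe m x := by
        simp only [Bool.or_eq_true, Bool.and_eq_true, Bool.not_eq_true', decide_eq_true_eq,
          decide_eq_false_iff_not, not_or, not_and, not_lt] at hc
        rcases Nat.lt_trichotomy (pvTier m) (pvTier x) with h | h | h
        · exact Or.inl h
        · exact Or.inr ⟨h, le_of_not_gt (by exact_mod_cast hc.2 (by omega))⟩
        · omega
      obtain ⟨r, hr, hmem, hrm, hmin⟩ := ih m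
      refine ⟨r, ?_, ?_, hrm, ?_⟩
      · rw [List.foldl_cons]; show List.foldl pvStep (if _ then some x else some m) t = some r
        rw [if_neg hc]; exact hr
      · rcases hmem with h | h
        · exact Or.inl h
        · exact Or.inr (List.mem_cons_of_mem _ h)
      · intro y hy
        rcases List.mem_cons.mp hy with h | h
        · exact h ▸ pvLe_trans hrm hmx
        · exact hmin y h

-- B's port returns the (tier, anchor)-minimum on a nonempty list
theorem pvB_isMin {anchors : List String} (h : anchors ≠ []) :
    ∃ r, pick_focus_node_py_alt anchors = some r ∧ pvIsMin r anchors := by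
  match anchors with
  | [] => exact absurd rfl h
  | x :: t =>
    obtain ⟨r, hr, hmem, hrx, hmin⟩ := pvMin2_go t x
    refine ⟨r, ?_, ?_, ?_⟩
    · rw [pick_focus_node_py_alt, if_neg h, pvMin2_eq_foldl, List.foldl_cons]
      exact hr
    · rcases hmem with hh | hh
      · exact hh ▸ List.mem_cons_self
      · exact List.mem_cons_of_mem _ hh
    · intro y hy
      rcases List.mem_cons.mp hy with hh | hh
      · exact hh ▸ hrx
      · exact hmin y hh

-- a find? over sorted(anchors) that fails means no anchor matches the prefix
theorem pvFind_none {anchors : List String} {p : String}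
    (h : (PySem.List.sorted anchors (fun x => x)).find? (fun a => PySem.Str.startswith a p) = none) :
    ∀ y ∈ anchors, PySem.Str.startswith y p = false := by
  intro y hy
  have := List.find?_eq_none.mp h y ((PySem.List.mem_sorted anchors (fun x => x) false y).mpr hy)
  simpa using this

-- a find? over sorted(anchors) that succeeds returns the alphabetically least matching anchor
theorem pvFind_some {anchors : List String} {p a : String}
    (h : (PySem.List.sorted anchors (fun x => x)).find? (fun a => PySem.Str.startswith a p) = some a) :
    a ∈ anchors ∧ PySem.Str.startswith a p = true ∧
      ∀ y ∈ anchors, PySem.Str.startswith y p = true → a ≤ y := by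
  obtain ⟨hpa, as, bs, hsplit, hnot⟩ := List.find?_eq_some_iff_append.mp h
  have hmem : a ∈ anchors := by
    have : a ∈ PySem.List.sorted anchors (fun x => x) := by
      rw [hsplit]; exact List.mem_append_right _ List.mem_cons_self
    exact (PySem.List.mem_sorted anchors (fun x => x) false a).mp this
  refine ⟨hmem, hpa, ?_⟩
  intro y hy hpy
  have hys : y ∈ PySem.List.sorted anchors (fun x => x) :=
    (PySem.List.mem_sorted anchors (fun x => x) false y).mpr hy
  rw [hsplit] at hys
  rcases List.mem_append.mp hys with hyas | hycons
  · exact absurd hpy (by simpa using hnot y hyas)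
  · rcases List.mem_cons.mp hycons with hh | hh
    · exact le_of_eq hh.symm
    · have hpw := PySem.List.sorted_pairwise anchors (fun x => x)
      rw [hsplit] at hpw
      exact ((List.pairwise_append.mp hpw).2.1 |> List.pairwise_cons.mp).1 y hh

-- the four possible tiers
theorem pvTier_mem (y : String) : pvTier y = 0 ∨ pvTier y = 1 ∨ pvTier y = 2 ∨ pvTier y = 3 := by
  unfold pvTier; split_ifs <;> simp

-- A's port returns the (tier, anchor)-minimum on a nonempty list
theorem pvA_isMin {anchors : List String} (h : anchors ≠ []) :
    ∃ r, pick_focus_node_py anchors = some r ∧ pvIsMin r anchors := by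
  rw [pick_focus_node_py, if_neg h]
  cases hC : (PySem.List.sorted anchors (fun x => x)).find?
      (fun a => PySem.Str.startswith a "Claim|") with
  | some a =>
    obtain ⟨hmem, hpa, hleast⟩ := pvFind_some hC
    have hta : pvTier a = 0 := by unfold pvTier; rw [if_pos hpa]
    have hloop : pvPickLoop ["Claim|", "Person|", "Policy|"] anchors = some a := by
      simp only [pvPickLoop]; rw [hC]
    refine ⟨a, by rw [hloop], hmem, ?_⟩
    intro y hy
    rcases pvTier_mem y with ht | ht | ht | ht
    · exact Or.inr ⟨by omega, hleast y hy (((pvTier_cases y).1).mp ht)⟩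
    all_goals exact Or.inl (by omega)
  | none =>
    have hCn := pvFind_none hC
    cases hP : (PySem.List.sorted anchors (fun x => x)).find?
        (fun a => PySem.Str.startswith a "Person|") with
    | some a =>
      obtain ⟨hmem, hpa, hleast⟩ := pvFind_some hP
      have hta : pvTier a = 1 := by
        unfold pvTier; rw [hCn a hmem, hpa]; simp
      have hloop : pvPickLoop ["Claim|", "Person|", "Policy|"] anchors = some a := by
        simp only [pvPickLoop]; rw [hC, hP]
      refine ⟨a, by rw [hloop], hmem, ?_⟩
      intro y hy
      rcases pvTier_mem y with ht | ht | ht | ht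
      · exact absurd (((pvTier_cases y).1).mp ht) (by rw [hCn y hy]; simp)
      · exact Or.inr ⟨by omega, hleast y hy (((pvTier_cases y).2.1).mp ht).2⟩
      all_goals exact Or.inl (by omega)
    | none =>
      have hPn := pvFind_none hP
      cases hPo : (PySem.List.sorted anchors (fun x => x)).find?
          (fun a => PySem.Str.startswith a "Policy|") with
      | some a =>
        obtain ⟨hmem, hpa, hleast⟩ := pvFind_some hPo
        have hta : pvTier a = 2 := by
          unfold pvTier; rw [hCn a hmem, hPn a hmem, hpa]; simp
        have hloop : pvPickLoop ["Claim|", "Person|", "Policy|"] anchors = some a := by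
          simp only [pvPickLoop]; rw [hC, hP, hPo]
        refine ⟨a, by rw [hloop], hmem, ?_⟩
        intro y hy
        rcases pvTier_mem y with ht | ht | ht | ht
        · exact absurd (((pvTier_cases y).1).mp ht) (by rw [hCn y hy]; simp)
        · exact absurd (((pvTier_cases y).2.1).mp ht).2 (by rw [hPn y hy]; simp)
        · exact Or.inr ⟨by omega, hleast y hy (((pvTier_cases y).2.2).mp ht).2.2⟩
        · exact Or.inl (by omega)
      | none =>
        have hPon := pvFind_none hPo
        have htier3 : ∀ y ∈ anchors, pvTier y = 3 := by
          intro y hy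
          unfold pvTier
          rw [hCn y hy, hPn y hy, hPon y hy]; simp
        cases hs : PySem.List.sorted anchors (fun x => x) with
        | nil => exact absurd ((PySem.List.sorted_eq_nil_iff anchors (fun x => x) false).mp hs) h
        | cons m t =>
          have hmm : m ∈ anchors := by
            have : m ∈ PySem.List.sorted anchors (fun x => x) := by
              rw [hs]; exact List.mem_cons_self
            exact (PySem.List.mem_sorted anchors (fun x => x) false m).mp this
          have hloop : pvPickLoop ["Claim|", "Person|", "Policy|"] anchors = none := by
            simp only [pvPickLoop]; rw [hC, hP, hPo]
          refine ⟨m, ?_, hmm, ?_⟩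
          · rw [hloop]; rw [PySem.List.pyGet?_zero_cons]
          · intro y hy
            exact Or.inr ⟨by rw [htier3 m hmm, htier3 y hy],
              PySem.List.key_head_sorted_le anchors (fun x => x) hs y hy⟩

-- ===== VERDICT (by name: the statement is the Claim_ definition above) =====
theorem pick_focus_node_py_spec : Claim_equal_pick_focus_node_py := by
  intro anchors _
  unfold Spec_pick_focus_node_py
  by_cases h : anchors = []
  · subst h; rfl
  · obtain ⟨a, hA, hPa⟩ := pvA_isMin h
    obtain ⟨b, hB, hPb⟩ := pvB_isMin h
    rw [hA, hB, pvMin_unique hPa hPb]
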